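-- pv_equiv track=rewrite | github.com/UW-Titop/maze-final | maze/env/KruskalMazeEnv.py | get_set_of_neighbours
-- ===== SOURCE A (Python) =====
-- def get_set_of_neighbours(first_neighbour, second_neighbour, empty_set):
--     first_set = set()
--     second_set = set()
--     for my_set in empty_set:
--         if first_neighbour in my_set:
--             first_set = my_set
--         if second_neighbour in my_set:
--             second_set = my_set
--     return first_set, second_set
-- ===== SOURCE B (Python) =====
-- def get_set_of_neighbours(first_neighbour, second_neighbour, empty_set):
--     index = {}
--     for my_set in empty_set:
--         for e in my_set:
--             index[e] = my_set
--     return index.get(first_neighbour, set()), index.get(second_neighbour, set())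
-- ===== Notes on version B (the rewrite author's own statement) =====
-- stated objective: alternative
-- what changed: B builds an element-to-set index dict in one pass and answers both queries by O(1) lookup, instead of A's scan with two inline membership tests per set.
import Mathlib
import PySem

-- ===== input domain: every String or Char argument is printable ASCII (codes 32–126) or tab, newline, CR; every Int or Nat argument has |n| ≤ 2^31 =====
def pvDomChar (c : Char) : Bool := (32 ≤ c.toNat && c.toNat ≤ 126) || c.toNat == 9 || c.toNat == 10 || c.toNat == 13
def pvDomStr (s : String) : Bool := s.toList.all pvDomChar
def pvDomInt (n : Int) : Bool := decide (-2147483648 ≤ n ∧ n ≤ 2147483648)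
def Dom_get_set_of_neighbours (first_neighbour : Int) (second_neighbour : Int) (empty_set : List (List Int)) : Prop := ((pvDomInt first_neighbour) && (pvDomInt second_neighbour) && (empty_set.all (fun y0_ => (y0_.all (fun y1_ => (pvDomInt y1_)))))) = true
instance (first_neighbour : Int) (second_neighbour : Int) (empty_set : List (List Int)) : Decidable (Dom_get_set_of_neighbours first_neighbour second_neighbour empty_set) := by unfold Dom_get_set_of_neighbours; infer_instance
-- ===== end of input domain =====

-- B builds an element→set index dict in one pass and answers both queries by lookup,
-- instead of A's scan with two inline membership tests per set (objective: alternative).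

-- ===== PORT A =====
-- A scans all sets, keeping the last set containing each neighbour (default: empty set).
def get_set_of_neighbours (first_neighbour : Int) (second_neighbour : Int) (empty_set : List (List Int)) : List Int × List Int :=
  let st := empty_set.foldl
    (fun (p : List Int × List Int) my_set =>
      (if first_neighbour ∈ my_set then my_set else p.1,
       if second_neighbour ∈ my_set then my_set else p.2))
    (([] : List Int), ([] : List Int))
  (st.1, st.2)

-- ===== PORT B =====
-- B: index[e] = my_set for every e of every my_set (later sets overwrite), then two lookups.
def get_set_of_neighbours_alt (first_neighbour : Int) (second_neighbour : Int) (empty_set : List (List Int)) : List Int × List Int :=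
  let index : PySem.Dict Int (List Int) :=
    empty_set.foldl
      (fun d my_set => my_set.foldl (fun d e => d.insert e my_set) d)
      PySem.Dict.empty
  (index.getD first_neighbour [], index.getD second_neighbour [])

-- ===== PRECONDITION & SPEC =====
def Spec_get_set_of_neighbours (first_neighbour : Int) (second_neighbour : Int) (empty_set : List (List Int)) (out : List Int × List Int) : Prop := out = get_set_of_neighbours_alt first_neighbour second_neighbour empty_set
instance (first_neighbour : Int) (second_neighbour : Int) (empty_set : List (List Int)) (out : List Int × List Int) : Decidable (Spec_get_set_of_neighbours first_neighbour second_neighbour empty_set out) := by unfold Spec_get_set_of_neighbours; infer_instance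

-- ===== CLAIM (what is proved, stated in full; the proofs are below) =====
def Claim_equal_get_set_of_neighbours : Prop := ∀ (first_neighbour : Int) (second_neighbour : Int) (empty_set : List (List Int)), Dom_get_set_of_neighbours first_neighbour second_neighbour empty_set → Spec_get_set_of_neighbours first_neighbour second_neighbour empty_set (get_set_of_neighbours first_neighbour second_neighbour empty_set)

-- ===== LEMMAS AND PROOFS =====

-- Inserting every element of l with the fixed value v: lookup x gives v iff x ∈ l.
theorem pv_getD_foldl_insert_const (l : List Int) (d : PySem.Dict Int (List Int)) (v : List Int) (x : Int) :
    (l.foldl (fun d e => d.insert e v) d).getD x [] = if x ∈ l then v else d.getD x [] := by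
  induction l generalizing d with
  | nil => simp
  | cons a t ih =>
    simp only [List.foldl_cons, ih, PySem.Dict.getD_insert, List.mem_cons]
    by_cases hx : x = a <;> simp [hx]

-- The whole index build: lookup x is the "last set containing x" fold.
theorem pv_getD_index (es : List (List Int)) (d : PySem.Dict Int (List Int)) (x : Int) :
    ((es.foldl (fun d s => s.foldl (fun d e => d.insert e s) d) d).getD x []) =
      es.foldl (fun acc s => if x ∈ s then s else acc) (d.getD x []) := by
  induction es generalizing d with
  | nil => rfl
  | cons s t ih =>
    simp only [List.foldl_cons, ih, pv_getD_foldl_insert_const]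

-- A's paired fold splits into two independent folds.
theorem pv_pair_fold (f s : Int) (es : List (List Int)) (p : List Int × List Int) :
    es.foldl (fun (p : List Int × List Int) m =>
        (if f ∈ m then m else p.1, if s ∈ m then m else p.2)) p =
      (es.foldl (fun acc m => if f ∈ m then m else acc) p.1,
       es.foldl (fun acc m => if s ∈ m then m else acc) p.2) := by
  induction es generalizing p with
  | nil => rfl
  | cons m t ih => simp only [List.foldl_cons, ih]

-- ===== VERDICT (by name: the statement is the Claim_ definition above) =====
theorem get_set_of_neighbours_spec : Claim_equal_get_set_of_neighbours := by
  intro f s es _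
  unfold Spec_get_set_of_neighbours get_set_of_neighbours get_set_of_neighbours_alt
  simp only [pv_pair_fold, pv_getD_index, PySem.Dict.getD_empty]
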